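-- pv_equiv track=rewrite | github.com/officialAbdii/pythonassignments | fourth_assignment.py | sort_by_component
-- ===== SOURCE A (Python) =====
-- def sort_by_component(input_list):
--     number_only_list = []
--     letter_only_list = []
--     full_mix_list = []
--     for i in input_list:
--         if i.isdigit():
--             number_only_list.append(i)
--         elif i.isalpha():
--             letter_only_list.append(i)
--         else:
--             full_mix_list.append(i)
--     return (number_only_list, letter_only_list, full_mix_list)
-- ===== SOURCE B (Python) =====
-- def sort_by_component(input_list):
--     number_only_list = [i for i in input_list if i.isdigit()]
--     letter_only_list = [i for i in input_list if i.isalpha()]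
--     full_mix_list = [i for i in input_list
--                      if not i.isdigit() and not i.isalpha()]
--     return (number_only_list, letter_only_list, full_mix_list)
-- ===== Notes on version B (the rewrite author's own statement) =====
-- stated objective: alternative
-- what changed: Replaces the single accumulating loop with three independent filtering passes (one list comprehension per category).
import Mathlib
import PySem

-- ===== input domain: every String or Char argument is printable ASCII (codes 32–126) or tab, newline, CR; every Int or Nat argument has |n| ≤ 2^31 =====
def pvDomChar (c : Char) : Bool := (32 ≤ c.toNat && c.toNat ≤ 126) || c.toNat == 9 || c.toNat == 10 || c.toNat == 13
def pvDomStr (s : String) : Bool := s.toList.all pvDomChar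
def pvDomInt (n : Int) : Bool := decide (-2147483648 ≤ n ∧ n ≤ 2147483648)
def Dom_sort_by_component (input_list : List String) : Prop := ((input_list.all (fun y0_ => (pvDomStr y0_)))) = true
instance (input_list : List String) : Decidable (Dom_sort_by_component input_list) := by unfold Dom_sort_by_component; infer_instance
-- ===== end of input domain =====

-- ===== PORT A =====
-- literal transliteration of A: one pass, three accumulators, appended in branch order
def sbcStep (acc : List String × List String × List String) (i : String) :
    List String × List String × List String :=
  let (n, l, m) := acc
  if PySem.Str.strIsdigit i then (n ++ [i], l, m)
  else if PySem.Str.strIsalpha i then (n, l ++ [i], m)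
  else (n, l, m ++ [i])

def sort_by_component (input_list : List String) : List String × List String × List String :=
  let (n, l, m) := input_list.foldl sbcStep ([], [], [])
  (n, l, m)

-- ===== PORT B =====
-- B: three independent filtering passes
def sort_by_component_alt (input_list : List String) : List String × List String × List String :=
  (input_list.filter (fun i => PySem.Str.strIsdigit i),
   input_list.filter (fun i => PySem.Str.strIsalpha i),
   input_list.filter (fun i => !PySem.Str.strIsdigit i && !PySem.Str.strIsalpha i))

-- ===== PRECONDITION & SPEC =====
def Spec_sort_by_component (input_list : List String) (out : List String × List String × List String) : Prop := out = sort_by_component_alt input_list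
instance (input_list : List String) (out : List String × List String × List String) : Decidable (Spec_sort_by_component input_list out) := by unfold Spec_sort_by_component; infer_instance

-- ===== CLAIM (what is proved, stated in full; the proofs are below) =====
def Claim_equal_sort_by_component : Prop := ∀ (input_list : List String), Dom_sort_by_component input_list → Spec_sort_by_component input_list (sort_by_component input_list)

-- ===== LEMMAS AND PROOFS =====

-- ===== VERDICT (by name: the statement is the Claim_ definition above) =====
-- a nonempty all-digit string is never all-alpha: needed because A's elif never tests isalpha after isdigit
lemma sbc_digit_not_alpha (c : Char) (h : PySem.Chars.isdigit c = true) :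
    PySem.Chars.isalpha c = false := by
  simp [PySem.Chars.isdigit, PySem.Chars.isalpha, PySem.Chars.isupper,
        PySem.Chars.islower, Char.le_def, UInt32.le_iff_toNat_le] at *
  omega

lemma sbc_not_both (s : String) (h : PySem.Chars.strIsdigit s.toList = true) :
    PySem.Chars.strIsalpha s.toList = false := by
  cases hs : s.toList with
  | nil => simp [hs, PySem.Chars.strIsdigit] at h
  | cons c cs =>
    simp [hs, PySem.Chars.strIsdigit] at h
    simp [PySem.Chars.strIsalpha, sbc_digit_not_alpha c h.1]

lemma sbc_foldl (xs : List String) (n l m : List String) :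
    xs.foldl sbcStep (n, l, m)
    = (n ++ xs.filter (fun i => PySem.Str.strIsdigit i),
       l ++ xs.filter (fun i => PySem.Str.strIsalpha i),
       m ++ xs.filter (fun i => !PySem.Str.strIsdigit i && !PySem.Str.strIsalpha i)) := by
  induction xs generalizing n l m with
  | nil => simp
  | cons x xs ih =>
    by_cases hd : PySem.Chars.strIsdigit x.toList
    · simp [sbcStep, hd, sbc_not_both x hd, ih]
    · by_cases ha : PySem.Chars.strIsalpha x.toList <;>
        simp [sbcStep, hd, ha, ih]

theorem sort_by_component_spec : Claim_equal_sort_by_component := by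
  intro xs _
  unfold Spec_sort_by_component sort_by_component sort_by_component_alt
  rw [sbc_foldl]
  simp
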